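-- pv_equiv track=rewrite | github.com/CrunchyJohnHaven/elastifund | scripts/run_btc5_market_model_autoresearch.py | _consecutive_discards
-- ===== SOURCE A (Python) =====
-- from typing import Any, Sequence
--
-- def _consecutive_discards(rows: list[dict[str, Any]]) -> int:
--     discard_count = 0
--     for row in reversed(rows):
--         status = str(row.get("status") or "").strip().lower()
--         if status == "keep":
--             break
--         if status == "discard":
--             discard_count += 1
--     return discard_count
-- ===== SOURCE B (Python) =====
-- # Forward one-pass with a counter that resets at every "keep" row, instead of
-- # A's backward early-exit scan.
-- def _consecutive_discards(rows):
--     count = 0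
--     for row in rows:
--         status = str(row.get("status") or "").strip().lower()
--         if status == "keep":
--             count = 0
--         elif status == "discard":
--             count += 1
--     return count
-- ===== Notes on version B (the rewrite author's own statement) =====
-- stated objective: alternative
-- what changed: Replaced A's backward early-exit scan (reversed iteration with break at 'keep') by a single forward pass with a counter that resets to 0 at each 'keep' row and increments on each 'discard' row.
import Mathlib
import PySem

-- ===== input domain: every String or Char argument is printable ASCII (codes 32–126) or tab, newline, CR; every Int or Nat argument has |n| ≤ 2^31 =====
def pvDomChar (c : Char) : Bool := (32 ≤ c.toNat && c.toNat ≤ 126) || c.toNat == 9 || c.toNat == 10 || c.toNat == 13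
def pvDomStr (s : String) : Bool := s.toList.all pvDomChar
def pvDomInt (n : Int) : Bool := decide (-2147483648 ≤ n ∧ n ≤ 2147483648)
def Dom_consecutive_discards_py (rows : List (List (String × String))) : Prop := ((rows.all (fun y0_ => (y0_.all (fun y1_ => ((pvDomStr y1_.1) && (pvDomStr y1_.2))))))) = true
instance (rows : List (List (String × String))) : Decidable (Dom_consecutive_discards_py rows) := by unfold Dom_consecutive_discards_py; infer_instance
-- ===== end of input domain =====

-- B replaces A's backward early-exit scan by a forward one-pass counter that resets at each
-- "keep" row (objective: alternative decomposition; same cost).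

-- shared helper: str(row.get("status") or "").strip().lower()
-- (values are strings, so `str(v)` is v and `v or ""` is v when nonempty, "" otherwise = v)
def pvStatus (row : List (String × String)) : String :=
  PySem.Str.lower (PySem.Str.strip ((List.lookup "status" row).getD ""))

-- ===== PORT A =====
-- the backward loop: break at "keep", count "discard"
def pvAGo : List (List (String × String)) → Int → Int
  | [], acc => acc
  | r :: rs, acc =>
    let s := pvStatus r
    if s = "keep" then acc
    else pvAGo rs (if s = "discard" then acc + 1 else acc)

def consecutive_discards_py (rows : List (List (String × String))) : Int :=
  pvAGo rows.reverse 0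

-- ===== PORT B =====
-- forward pass: reset counter on "keep", increment on "discard"
def pvBStep (count : Int) (row : List (String × String)) : Int :=
  let s := pvStatus row
  if s = "keep" then 0
  else if s = "discard" then count + 1
  else count

def consecutive_discards_py_alt (rows : List (List (String × String))) : Int :=
  rows.foldl pvBStep 0

-- ===== PRECONDITION & SPEC =====
def Spec_consecutive_discards_py (rows : List (List (String × String))) (out : Int) : Prop := out = consecutive_discards_py_alt rows
instance (rows : List (List (String × String))) (out : Int) : Decidable (Spec_consecutive_discards_py rows out) := by unfold Spec_consecutive_discards_py; infer_instance

-- ===== CLAIM (what is proved, stated in full; the proofs are below) =====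
def Claim_equal_consecutive_discards_py : Prop := ∀ (rows : List (List (String × String))), Dom_consecutive_discards_py rows → Spec_consecutive_discards_py rows (consecutive_discards_py rows)

-- ===== LEMMAS AND PROOFS =====

-- A's loop accumulator is additive
theorem pvAGo_acc (l : List (List (String × String))) (acc : Int) :
    pvAGo l acc = acc + pvAGo l 0 := by
  induction l generalizing acc with
  | nil => simp [pvAGo]
  | cons r rs ih =>
    simp only [pvAGo]
    split_ifs with h h2
    · omega
    · rw [ih, ih (0 + 1)]; omega
    · exact ih acc

-- the backward scan of l equals the forward reset-fold of l.reverse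
theorem pvAGo_eq_foldl_reverse (l : List (List (String × String))) :
    pvAGo l 0 = (l.reverse).foldl pvBStep 0 := by
  induction l with
  | nil => simp [pvAGo]
  | cons r rs ih =>
    simp only [List.reverse_cons, List.foldl_append, List.foldl_cons, List.foldl_nil, ← ih]
    simp only [pvAGo, pvBStep]
    split_ifs with h1 h2
    · rfl
    · rw [pvAGo_acc]; omega
    · rfl

-- ===== VERDICT (by name: the statement is the Claim_ definition above) =====
theorem consecutive_discards_py_spec : Claim_equal_consecutive_discards_py := by
  intro rows _
  unfold Spec_consecutive_discards_py consecutive_discards_py consecutive_discards_py_alt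
  rw [pvAGo_eq_foldl_reverse, List.reverse_reverse]
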